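-- pv_equiv track=rewrite | github.com/CicadaKim/TT_Highlight_Clipper | src/tt_highlights/steps/audio_events.py | _find_label_indices
-- ===== SOURCE A (Python) =====
-- def _find_label_indices(labels: list[str], patterns: list[str]) -> list[int]:
--     """Find indices where label contains any of the pattern substrings."""
--     indices = []
--     for i, label in enumerate(labels):
--         for pat in patterns:
--             if pat.lower() in label.lower():
--                 indices.append(i)
--                 break
--     return indices
-- ===== SOURCE B (Python) =====
-- def _find_label_indices(labels: list[str], patterns: list[str]) -> list[int]:
--     """Find indices where label contains any of the pattern substrings."""
--     hits = set()
--     lowered = [label.lower() for label in labels]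
--     for pat in patterns:
--         p = pat.lower()
--         for i, lab in enumerate(lowered):
--             if p in lab:
--                 hits.add(i)
--     return sorted(hits)
-- ===== Notes on version B (the rewrite author's own statement) =====
-- stated objective: alternative
-- what changed: Loop order interchanged: B lowers every label once, then scans all labels per pattern collecting matching indices into a set, and returns the sorted set, instead of A's per-label inner scan over patterns with an early break.
import Mathlib
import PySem

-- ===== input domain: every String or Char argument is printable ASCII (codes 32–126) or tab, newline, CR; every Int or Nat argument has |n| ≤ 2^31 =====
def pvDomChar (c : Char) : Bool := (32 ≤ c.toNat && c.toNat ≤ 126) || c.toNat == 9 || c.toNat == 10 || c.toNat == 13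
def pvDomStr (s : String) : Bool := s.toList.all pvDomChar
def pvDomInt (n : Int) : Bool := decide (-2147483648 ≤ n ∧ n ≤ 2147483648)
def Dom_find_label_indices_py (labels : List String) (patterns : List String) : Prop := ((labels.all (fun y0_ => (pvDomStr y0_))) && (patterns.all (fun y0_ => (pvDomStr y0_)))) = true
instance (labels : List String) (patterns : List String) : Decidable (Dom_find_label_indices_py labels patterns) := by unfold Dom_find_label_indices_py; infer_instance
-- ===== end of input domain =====

-- B interchanges the loops (per-pattern scan over labels lowered once, collecting a set, then sorted);
-- same asymptotic cost as A — objective: alternative.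

-- ===== PORT A =====
-- inner 'for pat in patterns: … break' loop of A
def pvInnerA (i : Int) (label : String) (patterns : List String) (acc : List Int) : List Int :=
  match patterns with
  | [] => acc
  | pat :: rest =>
    if PySem.Str.isIn (PySem.Str.lower pat) (PySem.Str.lower label) then acc ++ [i]
    else pvInnerA i label rest acc

def find_label_indices_py (labels : List String) (patterns : List String) : List Int :=
  (PySem.List.enumerate labels 0).foldl (fun indices p => pvInnerA p.1 p.2 patterns indices) []

-- ===== PORT B =====
def find_label_indices_py_alt (labels : List String) (patterns : List String) : List Int :=
  let lowered := labels.map PySem.Str.lower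
  let hits : PySem.Set Int := patterns.foldl (fun s pat =>
      (PySem.List.enumerate lowered 0).foldl
        (fun s q => if PySem.Str.isIn (PySem.Str.lower pat) q.2 then PySem.Set.add s q.1 else s) s)
    PySem.Set.empty
  PySem.List.sorted hits (fun x => x) false

-- ===== PRECONDITION & SPEC =====
def Spec_find_label_indices_py (labels : List String) (patterns : List String) (out : List Int) : Prop := out = find_label_indices_py_alt labels patterns
instance (labels : List String) (patterns : List String) (out : List Int) : Decidable (Spec_find_label_indices_py labels patterns out) := by unfold Spec_find_label_indices_py; infer_instance

-- ===== CLAIM (what is proved, stated in full; the proofs are below) =====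
def Claim_equal_find_label_indices_py : Prop := ∀ (labels : List String) (patterns : List String), Dom_find_label_indices_py labels patterns → Spec_find_label_indices_py labels patterns (find_label_indices_py labels patterns)

-- ===== LEMMAS AND PROOFS =====

-- A's inner break-loop appends i exactly when some pattern matches
theorem pvInnerA_eq (i : Int) (label : String) (patterns : List String) (acc : List Int) :
    pvInnerA i label patterns acc =
      if patterns.any (fun pat => PySem.Str.isIn (PySem.Str.lower pat) (PySem.Str.lower label)) then acc ++ [i] else acc := by
  induction patterns with
  | nil => simp [pvInnerA]
  | cons pat rest ih =>
    simp only [pvInnerA, List.any_cons, Bool.or_eq_true, ih]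
    split_ifs <;> simp_all <;> aesop

def pvPredA (patterns : List String) (q : Int × String) : Bool :=
  patterns.any (fun pat => PySem.Str.isIn (PySem.Str.lower pat) (PySem.Str.lower q.2))

theorem find_label_indices_py_eq (labels patterns : List String) :
    find_label_indices_py labels patterns =
      ((PySem.List.enumerate labels 0).filter (pvPredA patterns)).map (·.1) := by
  unfold find_label_indices_py
  rw [show (fun (indices : List Int) (p : Int × String) => pvInnerA p.1 p.2 patterns indices)
        = fun acc q => if pvPredA patterns q then acc ++ [q.1] else acc from
      funext₂ (fun acc q => by rw [pvInnerA_eq]; rfl)]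
  simpa using PySem.List.foldl_append_if (pvPredA patterns) (fun (q : Int × String) => q.1)
    (PySem.List.enumerate labels) []

-- membership in B's inner fold
theorem pv_mem_inner (P : String) (l : List (Int × String)) (s : PySem.Set Int) (x : Int) :
    x ∈ l.foldl (fun s q => if PySem.Str.isIn P q.2 then PySem.Set.add s q.1 else s) s ↔
      x ∈ s ∨ ∃ q ∈ l, q.1 = x ∧ PySem.Str.isIn P q.2 = true := by
  induction l generalizing s with
  | nil => simp
  | cons q rest ih =>
    simp only [List.foldl_cons, List.mem_cons, ih]
    by_cases h : PySem.Str.isIn P q.2 = true <;>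
      simp_all [PySem.Set.mem_add] <;> aesop

theorem pv_nodup_inner (P : String) (l : List (Int × String)) (s : PySem.Set Int) (hs : s.Nodup) :
    (l.foldl (fun s q => if PySem.Str.isIn P q.2 then PySem.Set.add s q.1 else s) s).Nodup := by
  induction l generalizing s with
  | nil => exact hs
  | cons q rest ih =>
    simp only [List.foldl_cons]
    split
    · exact ih _ (PySem.Set.nodup_add _ _ hs)
    · exact ih _ hs

-- membership in B's outer fold
theorem pv_mem_outer (pats : List String) (l : List (Int × String)) (s : PySem.Set Int) (x : Int) :
    x ∈ pats.foldl (fun s pat =>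
        l.foldl (fun s q => if PySem.Str.isIn (PySem.Str.lower pat) q.2 then PySem.Set.add s q.1 else s) s) s ↔
      x ∈ s ∨ ∃ pat ∈ pats, ∃ q ∈ l, q.1 = x ∧ PySem.Str.isIn (PySem.Str.lower pat) q.2 = true := by
  induction pats generalizing s with
  | nil => simp
  | cons pat rest ih =>
    simp only [List.foldl_cons, List.mem_cons]
    rw [ih, pv_mem_inner]
    aesop

theorem pv_nodup_outer (pats : List String) (l : List (Int × String)) (s : PySem.Set Int) (hs : s.Nodup) :
    (pats.foldl (fun s pat =>
        l.foldl (fun s q => if PySem.Str.isIn (PySem.Str.lower pat) q.2 then PySem.Set.add s q.1 else s) s) s).Nodup := by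
  induction pats generalizing s with
  | nil => exact hs
  | cons pat rest ih => exact ih _ (pv_nodup_inner _ _ _ hs)

-- A's list is strictly increasing
theorem pvListA_pairwise (labels patterns : List String) :
    (((PySem.List.enumerate labels 0).filter (pvPredA patterns)).map (·.1)).Pairwise (· < ·) := by
  rw [List.pairwise_map]
  exact ((PySem.List.pairwise_lt_enumerate labels 0).sublist List.filter_sublist)

-- same members
theorem pv_mem_eq (labels patterns : List String) (x : Int) :
    (x ∈ patterns.foldl (fun s pat =>
        (PySem.List.enumerate (labels.map PySem.Str.lower) 0).foldl
          (fun s q => if PySem.Str.isIn (PySem.Str.lower pat) q.2 then PySem.Set.add s q.1 else s) s)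
        PySem.Set.empty) ↔
      x ∈ ((PySem.List.enumerate labels 0).filter (pvPredA patterns)).map (·.1) := by
  rw [pv_mem_outer]
  simp only [PySem.Set.empty, List.not_mem_nil, false_or, List.mem_map, List.mem_filter,
    PySem.List.mem_enumerate_iff, pvPredA, List.any_eq_true]
  constructor
  · rintro ⟨pat, hpat, q, ⟨k, hk, rfl⟩, hx, hin⟩
    refine ⟨((k : Int), labels[k]'(by simpa using hk)), ⟨⟨k, by simpa using hk, by simp⟩, ?_⟩, by simpa using hx⟩
    exact ⟨pat, hpat, by simpa using hin⟩
  · rintro ⟨q, ⟨⟨k, hk, rfl⟩, pat, hpat, hin⟩, hx⟩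
    exact ⟨pat, hpat, ((k : Int), PySem.Str.lower (labels[k])),
      ⟨k, by simpa using hk, by simp⟩, by simpa using hx, by simpa using hin⟩

-- ===== VERDICT (by name: the statement is the Claim_ definition above) =====
theorem find_label_indices_py_spec : Claim_equal_find_label_indices_py := by
  intro labels patterns _
  unfold Spec_find_label_indices_py find_label_indices_py_alt
  rw [find_label_indices_py_eq]
  set ListA := ((PySem.List.enumerate labels 0).filter (pvPredA patterns)).map (·.1) with hLA
  have hpw := pvListA_pairwise labels patterns
  have hnA : ListA.Nodup := hpw.imp ne_of_lt
  have hnB := pv_nodup_outer patterns (PySem.List.enumerate (labels.map PySem.Str.lower) 0)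
    PySem.Set.empty (by simp [PySem.Set.empty])
  have hperm : ListA.Perm _ := (List.perm_ext_iff_of_nodup hnA hnB).mpr
    (fun x => (pv_mem_eq labels patterns x).symm)
  exact (PySem.List.sorted_eq_of_perm_of_pairwise_lt _ _ _ hperm hpw).symm
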